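-- pv_equiv track=rewrite | github.com/d4sky/profesori | scopus.py | Get_first_n_values
-- ===== SOURCE A (Python) =====
-- def Get_first_n_values(values, n=1):
--     ret_values = []
--     for i in range(n):
--         if len(values) > i:
--             ret_values.append(values[i])
--         else:
--             ret_values.append("na")
--     return tuple(ret_values)
-- ===== SOURCE B (Python) =====
-- def Get_first_n_values(values, n=1):
--     head = list(values[:max(n, 0)])
--     pad = max(n, 0) - len(head)
--     return tuple(head + ["na"] * pad)
-- ===== Notes on version B (the rewrite author's own statement) =====
-- stated objective: simpler
-- what changed: Replaces A's index-by-index loop with a per-index conditional by a single slice for the head plus one bulk replicated padding block.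
import Mathlib
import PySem

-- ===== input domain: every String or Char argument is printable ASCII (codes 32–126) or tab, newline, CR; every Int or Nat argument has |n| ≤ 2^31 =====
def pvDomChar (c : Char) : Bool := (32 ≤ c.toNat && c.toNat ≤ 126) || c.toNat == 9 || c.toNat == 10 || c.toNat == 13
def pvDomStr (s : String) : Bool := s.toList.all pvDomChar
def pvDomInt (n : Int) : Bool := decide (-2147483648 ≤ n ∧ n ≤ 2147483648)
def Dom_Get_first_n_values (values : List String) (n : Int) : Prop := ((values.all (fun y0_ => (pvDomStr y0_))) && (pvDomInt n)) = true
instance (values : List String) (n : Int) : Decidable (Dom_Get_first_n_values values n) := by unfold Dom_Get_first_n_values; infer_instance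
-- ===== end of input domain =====

-- B replaces A's index-by-index loop-with-conditional by a slice for the head plus one bulk "na" padding block (simpler decomposition; same cost).


-- ===== PORT A =====
-- for i in range(n): append values[i] if len(values) > i else "na"
-- (values[i] is ported as pyGetD with a dummy default; the branch guarantees 0 ≤ i < len, so it is exact)
def Get_first_n_values (values : List String) (n : Int) : List String :=
  (PySem.List.pyRange 0 n 1).foldl
    (fun ret_values i =>
      if (values.length : Int) > i then ret_values ++ [PySem.List.pyGetD values i ""]
      else ret_values ++ ["na"])
    []

-- ===== PORT B =====
-- head = list(values[:max(n,0)]); pad = max(n,0) - len(head); head + ["na"]*pad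
def Get_first_n_values_alt (values : List String) (n : Int) : List String :=
  let m : Nat := (max n 0).toNat
  let head := values.take m
  head ++ List.replicate (m - head.length) "na"

-- ===== PRECONDITION & SPEC =====
def Spec_Get_first_n_values (values : List String) (n : Int) (out : List String) : Prop := out = Get_first_n_values_alt values n
instance (values : List String) (n : Int) (out : List String) : Decidable (Spec_Get_first_n_values values n out) := by unfold Spec_Get_first_n_values; infer_instance

-- ===== CLAIM (what is proved, stated in full; the proofs are below) =====
def Claim_equal_Get_first_n_values : Prop := ∀ (values : List String) (n : Int), Dom_Get_first_n_values values n → Spec_Get_first_n_values values n (Get_first_n_values values n)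

-- ===== LEMMAS AND PROOFS =====

-- A's loop over range(k) computes the first k values padded with "na".
theorem pv_loop_eq (values : List String) (k : Nat) :
    (List.foldl
      (fun ret_values i =>
        if (values.length : Int) > i then ret_values ++ [PySem.List.pyGetD values i ""]
        else ret_values ++ ["na"])
      [] ((List.range k).map Int.ofNat))
    = values.take k ++ List.replicate (k - (values.take k).length) "na" := by
  induction k with
  | zero => simp
  | succ k ih =>
    rw [List.range_succ, List.map_append, List.foldl_append, ih]
    by_cases h : k < values.length
    · have hk : (values.length : Int) > (k : Int) := by exact_mod_cast h
      simp only [List.map_cons, List.map_nil, List.foldl_cons, List.foldl_nil, Int.ofNat_eq_natCast]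
      rw [if_pos hk, PySem.List.pyGetD_natCast]
      have h1 : (values.take k).length = k := by rw [List.length_take]; omega
      rw [List.take_add_one, List.getElem?_eq_getElem h, List.getD_eq_getElem?_getD,
        List.getElem?_eq_getElem h]
      simp [h1]
      omega
    · have hk : ¬ ((values.length : Int) > (k : Int)) := by
        rw [not_lt]; rw [Nat.not_lt] at h; exact_mod_cast h
      rw [Nat.not_lt] at h
      simp only [List.map_cons, List.map_nil, List.foldl_cons, List.foldl_nil, Int.ofNat_eq_natCast]
      rw [if_neg hk]
      rw [List.take_of_length_le h, List.take_of_length_le (Nat.le_succ_of_le h)]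
      rw [List.append_assoc]
      congr 1
      rw [← List.replicate_succ' ]
      congr 1
      omega

theorem Get_first_n_values_eq_alt (values : List String) (n : Int) :
    Get_first_n_values values n = Get_first_n_values_alt values n := by
  unfold Get_first_n_values Get_first_n_values_alt
  rw [PySem.List.pyRange_one]
  simp only [Int.sub_zero, zero_add]
  have hm : (max n 0).toNat = n.toNat := by omega
  have h := pv_loop_eq values n.toNat
  simp only [hm]
  simpa [Int.ofNat_eq_natCast] using h

-- ===== VERDICT (by name: the statement is the Claim_ definition above) =====
theorem Get_first_n_values_spec : Claim_equal_Get_first_n_values := by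
  intro values n _
  exact Get_first_n_values_eq_alt values n
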